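-- pv_equiv track=rewrite | github.com/pypi-data/pypi-mirror-383 | packages/quickbars-bridge/quickbars_bridge-0.0.6.tar.gz/quickbars_bridge-0.0.6/src/quickbars_bridge/qb.py | name_taken
-- ===== SOURCE A (Python) =====
-- from typing import Iterable, Dict, Any, Set, List, Tuple
--
-- def name_taken(new_name: str, qb_list: List[Dict[str, Any]], exclude_index: int) -> bool:
--     """Case-insensitive check that excludes the current QB index."""
--     if not new_name:
--         return False
--     ci = {
--         (x.get("name") or "").strip().casefold()
--         for i, x in enumerate(qb_list) if i != exclude_index
--     }
--     return new_name.strip().casefold() in ci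
-- ===== SOURCE B (Python) =====
-- def name_taken(new_name, qb_list, exclude_index):
--     if not new_name:
--         return False
--     target = new_name.strip().casefold()
--     names = [(x.get("name") or "").strip().casefold() for x in qb_list]
--     cnt = names.count(target)
--     if 0 <= exclude_index < len(names) and names[exclude_index] == target:
--         cnt -= 1
--     return cnt > 0
-- ===== Notes on version B (the rewrite author's own statement) =====
-- stated objective: alternative
-- what changed: B replaces A's skip-one-index set construction plus membership test with arithmetic: it counts ALL occurrences of the normalized target among the normalized names, subtracts one if the excluded index itself holds the target, and returns whether the adjusted count is positive; no index is ever skipped during the scan and no set is built.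
import Mathlib
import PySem

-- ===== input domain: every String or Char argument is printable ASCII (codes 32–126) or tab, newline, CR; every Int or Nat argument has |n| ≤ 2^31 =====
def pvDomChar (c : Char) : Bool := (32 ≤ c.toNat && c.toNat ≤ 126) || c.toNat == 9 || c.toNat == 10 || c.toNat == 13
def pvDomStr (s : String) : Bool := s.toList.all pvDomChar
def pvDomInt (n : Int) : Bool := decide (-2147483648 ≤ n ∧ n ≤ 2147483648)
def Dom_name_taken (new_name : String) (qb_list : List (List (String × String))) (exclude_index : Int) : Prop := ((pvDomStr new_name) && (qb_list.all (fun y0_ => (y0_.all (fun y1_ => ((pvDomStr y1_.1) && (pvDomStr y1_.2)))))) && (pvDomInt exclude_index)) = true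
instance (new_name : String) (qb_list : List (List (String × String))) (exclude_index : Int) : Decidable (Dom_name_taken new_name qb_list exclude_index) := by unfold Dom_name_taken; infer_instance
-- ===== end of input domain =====

-- B replaces A's skip-one-index set-and-membership with count-all-then-subtract-the-excluded-hit arithmetic (objective: alternative).
-- (x.get("name") or "").strip().casefold(); on the ASCII domain casefold = lower, and the 'or ""' collapses
-- both a missing key and an empty value to "", which PySem.Dict.getD (PySem.Dict.mk x) "name" "" reproduces exactly.
def pvKey (x : List (String × String)) : String :=
  PySem.Str.lower (PySem.Str.strip (PySem.Dict.getD (PySem.Dict.mk x) "name" ""))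

-- ===== PORT A =====
def name_taken (new_name : String) (qb_list : List (List (String × String))) (exclude_index : Int) : Bool :=
  if new_name = "" then false
  else
    let ci : PySem.Set String :=
      (PySem.List.enumerate qb_list).foldl
        (fun s p => if p.1 ≠ exclude_index then PySem.Set.add s (pvKey p.2) else s)
        PySem.Set.empty
    PySem.Set.contains ci (PySem.Str.lower (PySem.Str.strip new_name))

-- ===== PORT B =====
def name_taken_alt (new_name : String) (qb_list : List (List (String × String))) (exclude_index : Int) : Bool :=
  if new_name = "" then false
  else
    let target := PySem.Str.lower (PySem.Str.strip new_name)
    let names := qb_list.map pvKey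
    let cnt : Int := names.count target
    -- 'names[exclude_index]' is reached only under the range guard, so pyGet? is exact here
    let cnt := if 0 ≤ exclude_index ∧ exclude_index < (names.length : Int) ∧
                  PySem.List.pyGet? names exclude_index = some target
               then cnt - 1 else cnt
    decide (0 < cnt)

-- ===== PRECONDITION & SPEC =====
def Spec_name_taken (new_name : String) (qb_list : List (List (String × String))) (exclude_index : Int) (out : Bool) : Prop := out = name_taken_alt new_name qb_list exclude_index
instance (new_name : String) (qb_list : List (List (String × String))) (exclude_index : Int) (out : Bool) : Decidable (Spec_name_taken new_name qb_list exclude_index out) := by unfold Spec_name_taken; infer_instance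

-- ===== CLAIM =====
def Claim_equal_name_taken : Prop := ∀ (new_name : String) (qb_list : List (List (String × String))) (exclude_index : Int), Dom_name_taken new_name qb_list exclude_index → Spec_name_taken new_name qb_list exclude_index (name_taken new_name qb_list exclude_index)

-- ===== LEMMAS AND PROOFS =====

-- membership in A's foldl-built set
theorem pv_mem_foldl_add (ex : Int) (t : String) :
    ∀ (l : List (Int × List (String × String))) (s0 : PySem.Set String),
      (t ∈ l.foldl (fun s p => if p.1 ≠ ex then PySem.Set.add s (pvKey p.2) else s) s0)
        ↔ t ∈ s0 ∨ ∃ p ∈ l, p.1 ≠ ex ∧ pvKey p.2 = t := by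
  intro l
  induction l with
  | nil => intro s0; simp
  | cons p l ih =>
    intro s0
    simp only [List.foldl_cons, ih, List.mem_cons, exists_eq_or_imp]
    by_cases h : p.1 = ex
    · simp only [h, ne_eq, not_true_eq_false, false_and, false_or, ite_false]
    · simp only [h, ne_eq, not_false_eq_true, true_and, ite_true, PySem.Set.mem_add, eq_comm]
      exact or_assoc

-- B's adjusted count is positive iff some index other than e holds t
set_option maxHeartbeats 1000000 in
theorem pv_cnt_iff (t : String) :
    ∀ (names : List String) (e : Int),
      (0 < (if 0 ≤ e ∧ e < (names.length : Int) ∧ PySem.List.pyGet? names e = some t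
            then (names.count t : Int) - 1 else (names.count t : Int)))
        ↔ ∃ (k : Nat) (_ : k < names.length), (k : Int) ≠ e ∧ names[k] = t := by
  intro names
  induction names with
  | nil =>
    intro e
    rw [if_neg (by rintro ⟨h1, h2, -⟩; simp at h2; omega)]
    simp
  | cons x xs ih =>
    intro e
    have hsplit : (∃ (k : Nat) (_ : k < (x :: xs).length), (k : Int) ≠ e ∧ (x :: xs)[k] = t)
        ↔ ((0 : Int) ≠ e ∧ x = t) ∨ ∃ (k : Nat) (_ : k < xs.length), (k : Int) ≠ e - 1 ∧ xs[k] = t := by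
      constructor
      · rintro ⟨k, hk, hne, hv⟩
        cases k with
        | zero => exact Or.inl ⟨hne, hv⟩
        | succ k =>
          refine Or.inr ⟨k, by simpa using hk, ?_, hv⟩
          intro h; apply hne; omega
      · rintro (⟨hne, hv⟩ | ⟨k, hk, hne, hv⟩)
        · exact ⟨0, by simp, hne, hv⟩
        · exact ⟨k + 1, by simpa using hk, by push_cast; omega, hv⟩
    rw [hsplit, ← ih (e - 1)]
    by_cases he : e = 0
    · subst he
      have hC2 : ¬((0:Int) ≤ 0 - 1 ∧ 0 - 1 < (xs.length : Int) ∧ PySem.List.pyGet? xs (0 - 1) = some t) := by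
        rintro ⟨h1, -, -⟩; omega
      rw [if_neg hC2]
      by_cases hx : x = t
      · subst hx
        have hC1 : (0:Int) ≤ 0 ∧ (0:Int) < ((x :: xs).length : Int) ∧ PySem.List.pyGet? (x :: xs) 0 = some x :=
          ⟨le_refl _, by simp, PySem.List.pyGet?_zero_cons x xs⟩
        rw [if_pos hC1, List.count_cons_self]
        push_cast
        constructor
        · intro hlt; exact Or.inr (by omega)
        · rintro (⟨h0, -⟩ | hlt)
          · exact h0.elim
          · omega
      · have hC1 : ¬((0:Int) ≤ 0 ∧ (0:Int) < ((x :: xs).length : Int) ∧ PySem.List.pyGet? (x :: xs) 0 = some t) := by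
          rintro ⟨-, -, hv⟩
          rw [PySem.List.pyGet?_zero_cons] at hv
          exact hx (Option.some_injective _ hv)
        rw [if_neg hC1]
        have hcnt : (x :: xs).count t = xs.count t := by simp [hx]
        rw [hcnt]
        simp [hx]
    · have hguard : (0 ≤ e ∧ e < ((x :: xs).length : Int) ∧ PySem.List.pyGet? (x :: xs) e = some t)
          ↔ (0 ≤ e - 1 ∧ e - 1 < (xs.length : Int) ∧ PySem.List.pyGet? xs (e - 1) = some t) := by
        constructor
        · rintro ⟨h0, hlt, hv⟩
          have h1 : 0 ≤ e - 1 := by omega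
          refine ⟨h1, by simp at hlt ⊢; omega, ?_⟩
          rw [PySem.List.pyGet?_of_nonneg _ h0] at hv
          rw [PySem.List.pyGet?_of_nonneg _ h1]
          have hts : e.toNat = (e - 1).toNat + 1 := by omega
          rw [hts] at hv
          simpa using hv
        · rintro ⟨h1, hlt, hv⟩
          refine ⟨by omega, by simp; omega, ?_⟩
          rw [PySem.List.pyGet?_of_nonneg _ h1] at hv
          rw [PySem.List.pyGet?_of_nonneg _ (by omega : (0:Int) ≤ e)]
          have hts : e.toNat = (e - 1).toNat + 1 := by omega
          rw [hts]
          simpa using hv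
      rw [if_congr hguard rfl rfl]
      by_cases hx : x = t
      · subst hx
        have hleft : ((0 : Int) ≠ e ∧ x = x) := ⟨fun h => he h.symm, rfl⟩
        rw [iff_true_intro hleft, true_or, iff_true, List.count_cons_self]
        by_cases hg : 0 ≤ e - 1 ∧ e - 1 < (xs.length : Int) ∧ PySem.List.pyGet? xs (e - 1) = some x
        · rw [if_pos hg]
          have hmem : x ∈ xs := PySem.List.mem_of_pyGet?_eq_some xs hg.2.2
          have hc : 0 < xs.count x := List.count_pos_iff.mpr hmem
          push_cast; omega
        · rw [if_neg hg]; push_cast; omega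
      · have hcnt : (x :: xs).count t = xs.count t := by simp [hx]
        rw [hcnt]
        simp only [hx, and_false, false_or]

-- ===== VERDICT =====
theorem name_taken_spec : Claim_equal_name_taken := by
  intro new_name qb_list exclude_index _
  unfold Spec_name_taken name_taken name_taken_alt
  by_cases h : new_name = ""
  · simp [h]
  · simp only [h, ite_false]
    set t := PySem.Str.lower (PySem.Str.strip new_name)
    rw [Bool.eq_iff_iff]
    rw [PySem.Set.contains_iff, pv_mem_foldl_add, decide_eq_true_iff,
      pv_cnt_iff t (qb_list.map pvKey) exclude_index]
    constructor
    · rintro (hs | ⟨p, hp, hne, hv⟩)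
      · exact absurd hs (by simp [PySem.Set.empty])
      · rcases (PySem.List.mem_enumerate_iff qb_list 0 p).mp hp with ⟨k, hk, rfl⟩
        exact ⟨k, by simpa using hk, by simpa using hne, by simpa using hv⟩
    · rintro ⟨k, hk, hne, hv⟩
      have hk' : k < qb_list.length := by simpa using hk
      refine Or.inr ⟨((k : Int), qb_list[k]), ?_, by simpa using hne, ?_⟩
      · exact (PySem.List.mem_enumerate_iff qb_list 0 _).mpr ⟨k, hk', by simp⟩
      · simpa using hv
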